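-- pv_equiv track=rewrite | github.com/wesleynascimento/tsp | utils.py | melhorVizinho
-- ===== SOURCE A (Python) =====
-- def tamanhoRota(distMatriz, solucao):
--     tamRota = 0
--     for i in range(len(solucao)):
--         tamRota += distMatriz[solucao[i - 1]][solucao[i]]
--     return tamRota
--
-- def melhorVizinho(distMatriz, vizinhos):
--     melhorRota = tamanhoRota(distMatriz, vizinhos[0])
--     melhorVizinho = vizinhos[0]
--     for x in vizinhos:
--         atualRota = tamanhoRota(distMatriz, x)
--         if atualRota < melhorRota:
--             melhorRota = atualRota
--             melhorVizinho = x
--     return melhorVizinho, melhorRota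
-- ===== SOURCE B (Python) =====
-- def melhorVizinho(distMatriz, vizinhos):
--     def custo(t):
--         return sum(distMatriz[t[i - 1]][t[i]] for i in range(len(t)))
--     melhor = sorted(vizinhos, key=custo)[0]
--     return melhor, custo(melhor)
-- ===== Notes on version B (the rewrite author's own statement) =====
-- stated objective: simpler
-- what changed: Replaces A's running-best accumulator loop (with its duplicate pre-loop evaluation of vizinhos[0]'s route) by sorting the neighbors by route length with a stable sort and taking the head, which is the first minimum exactly as A's strict-< scan.
import Mathlib
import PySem

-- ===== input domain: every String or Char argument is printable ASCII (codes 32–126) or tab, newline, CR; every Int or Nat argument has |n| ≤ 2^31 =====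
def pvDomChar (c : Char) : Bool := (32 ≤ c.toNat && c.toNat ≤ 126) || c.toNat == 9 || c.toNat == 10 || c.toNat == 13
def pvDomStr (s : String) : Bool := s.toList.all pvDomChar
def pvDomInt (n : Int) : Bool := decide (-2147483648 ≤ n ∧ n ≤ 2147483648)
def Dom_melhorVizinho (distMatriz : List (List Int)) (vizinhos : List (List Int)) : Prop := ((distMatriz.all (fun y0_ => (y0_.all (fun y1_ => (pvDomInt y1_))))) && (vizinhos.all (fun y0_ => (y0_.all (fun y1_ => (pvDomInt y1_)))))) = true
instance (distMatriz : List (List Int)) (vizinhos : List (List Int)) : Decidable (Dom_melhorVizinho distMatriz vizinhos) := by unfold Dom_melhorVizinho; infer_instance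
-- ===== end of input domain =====

-- B replaces A's running-best scan by sorting the neighbor list by route length
-- (stable sort, so the head is the first minimum) and taking the head (objective: simpler).

-- ===== PORT A =====
-- for i in range(len(solucao)): tamRota += distMatriz[solucao[i-1]][solucao[i]]
-- (indices valid under Pre_, so pyGetD's defaults are never used there)
def tamanhoRota (distMatriz : List (List Int)) (solucao : List Int) : Int :=
  (PySem.List.pyRange 0 solucao.length 1).foldl
    (fun tamRota i =>
      tamRota +
        PySem.List.pyGetD
          (PySem.List.pyGetD distMatriz (PySem.List.pyGetD solucao (i - 1) 0) [])
          (PySem.List.pyGetD solucao i 0) 0) 0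

def melhorVizinho (distMatriz : List (List Int)) (vizinhos : List (List Int)) : List Int × Int :=
  let melhorRota := tamanhoRota distMatriz (PySem.List.pyGetD vizinhos 0 [])
  let melhorViz := PySem.List.pyGetD vizinhos 0 []
  vizinhos.foldl
    (fun s x =>
      let atualRota := tamanhoRota distMatriz x
      if atualRota < s.2 then (x, atualRota) else s)
    (melhorViz, melhorRota)

-- ===== PORT B =====
-- custo(t) = sum(distMatriz[t[i-1]][t[i]] for i in range(len(t)))
def custo (distMatriz : List (List Int)) (t : List Int) : Int :=
  ((PySem.List.pyRange 0 t.length 1).map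
    (fun i =>
      PySem.List.pyGetD
        (PySem.List.pyGetD distMatriz (PySem.List.pyGetD t (i - 1) 0) [])
        (PySem.List.pyGetD t i 0) 0)).sum

-- melhor = sorted(vizinhos, key=custo)[0]; return melhor, custo(melhor)
-- ([0] on the empty sorted list raises IndexError in Python: outside Pre_)
def melhorVizinho_alt (distMatriz : List (List Int)) (vizinhos : List (List Int)) : List Int × Int :=
  let melhor := PySem.List.pyGetD (PySem.List.sorted vizinhos (custo distMatriz) false) 0 []
  (melhor, custo distMatriz melhor)

-- ===== PRECONDITION & SPEC =====
-- one consecutive pair of a tour indexes distMatriz successfully (Python semantics,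
-- negative indices count from the end)
def pvOkPair (distMatriz : List (List Int)) (x : List Int) (i : Int) : Bool :=
  match PySem.List.pyGet? x (i - 1) with
  | none => false
  | some a =>
    match PySem.List.pyGet? x i with
    | none => false
    | some b =>
      match PySem.List.pyGet? distMatriz a with
      | none => false
      | some row => (PySem.List.pyGet? row b).isSome

-- exactly the inputs where A returns: vizinhos nonempty (else vizinhos[0] raises
-- IndexError) and every tour's indexing of distMatriz is in range (else IndexError)
def Pre_melhorVizinho (distMatriz : List (List Int)) (vizinhos : List (List Int)) : Prop :=
  vizinhos ≠ [] ∧ ∀ x ∈ vizinhos, ∀ i ∈ PySem.List.pyRange 0 x.length 1, pvOkPair distMatriz x i = true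
instance (distMatriz : List (List Int)) (vizinhos : List (List Int)) : Decidable (Pre_melhorVizinho distMatriz vizinhos) := by unfold Pre_melhorVizinho; infer_instance

def pvWitness_melhorVizinho : List (List Int) × List (List Int) :=
  ([[0, 3], [2, 0]], [[0, 1], [1, 0], [0]])

def Spec_melhorVizinho (distMatriz : List (List Int)) (vizinhos : List (List Int)) (out : List Int × Int) : Prop := out = melhorVizinho_alt distMatriz vizinhos
instance (distMatriz : List (List Int)) (vizinhos : List (List Int)) (out : List Int × Int) : Decidable (Spec_melhorVizinho distMatriz vizinhos out) := by unfold Spec_melhorVizinho; infer_instance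

-- ===== CLAIM (what is proved, stated in full; the proofs are below) =====
def Claim_equal_melhorVizinho : Prop := ∀ (distMatriz : List (List Int)) (vizinhos : List (List Int)), Dom_melhorVizinho distMatriz vizinhos → Pre_melhorVizinho distMatriz vizinhos → Spec_melhorVizinho distMatriz vizinhos (melhorVizinho distMatriz vizinhos)

-- ===== LEMMAS AND PROOFS =====

theorem pvWitness_ok :
    Dom_melhorVizinho pvWitness_melhorVizinho.1 pvWitness_melhorVizinho.2 ∧
    Pre_melhorVizinho pvWitness_melhorVizinho.1 pvWitness_melhorVizinho.2 := by decide

-- A's per-tour length (foldl-add) equals B's (sum of map over the same range)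
theorem tamanhoRota_eq_custo (distMatriz : List (List Int)) (x : List Int) :
    tamanhoRota distMatriz x = custo distMatriz x := by
  unfold tamanhoRota custo
  rw [List.sum_eq_foldl, List.foldl_map]

-- the head of insertion sort, started from a nonempty accumulator, is the
-- running strict-< minimum of the inserted elements against the initial head
theorem foldl_insertBy_head {α : Type} (key : α → Int) :
    ∀ (t : List α) (h : α) (tl : List α), ∃ tl',
      t.foldl (fun acc x => PySem.List.insertBy (fun a b => decide (key a < key b)) x acc) (h :: tl)
        = (t.foldl (fun b x => if key x < key b then x else b) h) :: tl' := by
  intro t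
  induction t with
  | nil => intro h tl; exact ⟨tl, rfl⟩
  | cons x t ih =>
    intro h tl
    simp only [List.foldl_cons, PySem.List.insertBy]
    by_cases hx : key x < key h
    · rw [if_pos (by simpa using hx), if_pos hx]
      exact ih x (h :: tl)
    · rw [if_neg (by simpa using hx), if_neg hx]
      exact ih h (PySem.List.insertBy (fun a b => decide (key a < key b)) x tl)

-- A's loop state always carries (best, key best)
theorem fold_best_pair {α : Type} (key : α → Int) :
    ∀ (t : List α) (v : α),
      t.foldl (fun s x => if key x < s.2 then (x, key x) else s) (v, key v)
        = (t.foldl (fun b x => if key x < key b then x else b) v,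
           key (t.foldl (fun b x => if key x < key b then x else b) v)) := by
  intro t
  induction t with
  | nil => intro v; rfl
  | cons x t ih =>
    intro v
    simp only [List.foldl_cons]
    by_cases hx : key x < key v
    · rw [if_pos hx, if_pos hx]; exact ih x
    · rw [if_neg hx, if_neg hx]; exact ih v

-- ===== VERDICT (by name: the statement is the Claim_ definition above) =====
theorem melhorVizinho_spec : Claim_equal_melhorVizinho := by
  intro distMatriz vizinhos _ hpre
  obtain ⟨hne, -⟩ := hpre
  obtain ⟨v, t, rfl⟩ := List.exists_cons_of_ne_nil hne
  have hf : tamanhoRota distMatriz = custo distMatriz :=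
    funext (tamanhoRota_eq_custo distMatriz)
  unfold Spec_melhorVizinho melhorVizinho melhorVizinho_alt
  simp only [hf, PySem.List.pyGetD_zero_cons, List.foldl_cons, lt_irrefl, if_false]
  rw [fold_best_pair (custo distMatriz) t v]
  rw [PySem.List.sorted_eq_foldl_insertBy]
  obtain ⟨tl', htl'⟩ := foldl_insertBy_head (custo distMatriz) t v []
  simp only [List.foldl_cons, PySem.List.insertBy] at htl' ⊢
  rw [htl', PySem.List.pyGetD_zero_cons]
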